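-- pv_equiv track=rewrite | github.com/atm1992/LeetCode_in_Python3 | weekly_contest/292/a6058_count-number-of-texts.py | countTexts
-- ===== SOURCE A (Python) =====
-- def countTexts(pressedKeys: str) -> int:
--     """
--     分组DP。dp[i] 表示以pressKey[i]结尾的方案个数，其中dp[0]=1
--     分情况讨论状态转移方程：
--     1、若pressedKeys[i] != pressedKeys[i-1]，则 dp[i]=dp[i-1]，可理解为在长度为i-1的字符串后面加了一个字符i(固定字母)，此时方案数不变
--     2、若pressedKeys[i] == pressedKeys[i-1]，则 dp[i]=dp[i-1] + dp[i-2]，可理解为在长度为i-1的字符串后面加了一个字符i，只不过这个字符与字符i-1相同，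
--     此时的方案数为dp[i-1]；另外，字符i 与 字符i-1可以合并组成一个新字母，然后接到长度为i-2的字符串后面，此时的方案数为dp[i-2]
--     3、若pressedKeys[i] == pressedKeys[i-1] == pressedKeys[i-2]，则 dp[i]=dp[i-1] + dp[i-2] + dp[i-3]，可理解为 情况2的基础上，
--     字符i、字符i-1、字符i-2合并组成一个新字母，然后接到长度为i-3的字符串后面，此时的方案数为dp[i-3]
--     4、若pressedKeys[i] == pressedKeys[i-1] == pressedKeys[i-2] == pressedKeys[i-3]，且字符为7或9，则 dp[i]=dp[i-1] + dp[i-2] + dp[i-3] + dp[i-4]，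
--     可理解为 情况3的基础上，字符i、字符i-1、字符i-2、字符i-3合并组成一个新字母，然后接到长度为i-4的字符串后面，此时的方案数为dp[i-4]
--     5、以情况2为例，假设pressedKeys[i] == pressedKeys[i-1]，i = 1，即 i < 2，此时dp[i-2]不存在，则认为dp[i-2]=1，
--     表示在长度为i-1的字符串后面加了一个字符i，此时方案数为dp[i-1]；然后，字符i 与 字符i-1合并组成一个字母，此时的方案数为1
--     """
--     mod = 10 ** 9 + 7
--     n = len(pressedKeys)
--     dp = [0] * n
--     dp[0] = 1
--     for i in range(1, n):
--         # 无论哪种情况，dp[i]都大于等于dp[i-1]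
--         val = dp[i - 1]
--         ch = pressedKeys[i]
--         if ch == pressedKeys[i - 1]:
--             val += dp[i - 2] if i >= 2 else 1
--             if i >= 2 and ch == pressedKeys[i - 2]:
--                 val += dp[i - 3] if i >= 3 else 1
--                 if i >= 3 and ch == pressedKeys[i - 3] and ch in ['7', '9']:
--                     val += dp[i - 4] if i >= 4 else 1
--         dp[i] = val % mod
--     return dp[-1]
-- ===== SOURCE B (Python) =====
-- def countTexts(pressedKeys: str) -> int:
--     MOD = 10 ** 9 + 7
--     # split into maximal runs of equal characters
--     runs = []
--     for ch in pressedKeys: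
--         if runs and runs[-1][0] == ch:
--             runs[-1] = (ch, runs[-1][1] + 1)
--         else:
--             runs.append((ch, 1))
--     # decodings multiply across run boundaries; count each run with a
--     # rolling 4-term window (a key letter covers up to 3 presses, 4 for '7'/'9')
--     ans = 1
--     for ch, length in runs:
--         four = ch in ('7', '9')
--         a, b, c, d = 0, 0, 0, 1  # f[k-4], f[k-3], f[k-2], f[k-1]; f[0] = 1
--         for _ in range(length):
--             a, b, c, d = b, c, d, ((a if four else 0) + b + c + d) % MOD
--         ans = ans * d % MOD
--     return ans
-- ===== Notes on version B (the rewrite author's own statement) =====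
-- stated objective: alternative
-- what changed: Instead of one dp array indexed over the whole string with lookbacks guarded by character comparisons, B splits the input into maximal runs of equal digits, counts each run independently with a rolling 4-value window, and multiplies the per-run counts mod 1e9+7 (decodings factor at run boundaries).
-- outside the precondition, e.g. on countTexts(''): A raises IndexError, B returns 1
import Mathlib
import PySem

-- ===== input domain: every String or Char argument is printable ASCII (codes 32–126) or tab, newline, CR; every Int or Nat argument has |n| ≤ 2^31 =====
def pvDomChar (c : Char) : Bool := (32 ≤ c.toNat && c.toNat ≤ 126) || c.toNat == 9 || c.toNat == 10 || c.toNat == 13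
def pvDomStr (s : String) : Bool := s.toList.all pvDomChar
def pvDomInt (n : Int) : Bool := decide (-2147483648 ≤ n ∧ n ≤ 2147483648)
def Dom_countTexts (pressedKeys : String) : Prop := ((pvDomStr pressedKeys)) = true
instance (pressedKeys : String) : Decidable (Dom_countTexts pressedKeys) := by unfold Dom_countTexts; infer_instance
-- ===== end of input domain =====

-- B re-implements A by splitting the input into maximal runs of equal digits, counting each run
-- with a rolling 4-value window and multiplying the per-run counts mod 1e9+7 (alternative
-- decomposition, same O(n) cost). A raises IndexError on "", which Pre_ excludes; B returns 1 there.

-- ===== PORT A =====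
-- loop body of A: dp[i] is written from dp[i-1..i-4] guarded by character comparisons
def aStep (s : List Char) (dp : List Int) (i : Int) : List Int :=
  let val := PySem.List.pyGetD dp (i - 1) 0
  let ch := PySem.List.pyGetD s i ' '
  let val :=
    if ch = PySem.List.pyGetD s (i - 1) ' ' then
      let val := val + (if 2 ≤ i then PySem.List.pyGetD dp (i - 2) 0 else 1)
      let val :=
        if 2 ≤ i ∧ ch = PySem.List.pyGetD s (i - 2) ' ' then
          let val := val + (if 3 ≤ i then PySem.List.pyGetD dp (i - 3) 0 else 1)
          if 3 ≤ i ∧ ch = PySem.List.pyGetD s (i - 3) ' ' ∧ (ch = '7' ∨ ch = '9') then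
            val + (if 4 ≤ i then PySem.List.pyGetD dp (i - 4) 0 else 1)
          else val
        else val
      val
    else val
  PySem.List.pySetD dp i (PySem.Int.mod val 1000000007)

def countTexts (pressedKeys : String) : Int :=
  let s := pressedKeys.toList
  let n := s.length
  -- 'dp[0] = 1' raises IndexError in Python when n = 0; that input is outside Pre_countTexts
  if n = 0 then 0
  else
    let dp := (List.replicate n (0 : Int)).set 0 1
    let dp := (PySem.List.pyRange 1 (n : Int) 1).foldl (aStep s) dp
    PySem.List.pyGetD dp (-1) 0

-- ===== PORT B =====
-- collect maximal runs of equal characters (Python mutates runs[-1] in place)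
def bStep (runs : List (Char × Nat)) (ch : Char) : List (Char × Nat) :=
  match runs.getLast? with
  | some (c, l) => if c = ch then runs.dropLast ++ [(c, l + 1)] else runs ++ [(ch, 1)]
  | none => [(ch, 1)]

def bRuns (s : List Char) : List (Char × Nat) := s.foldl bStep []

-- per-run count: rolling window (f[k-4], f[k-3], f[k-2], f[k-1]) of the run DP
def bRunCount (four : Bool) (length : Nat) : Int :=
  let st := (List.range length).foldl
    (fun (t : Int × Int × Int × Int) _ =>
      (t.2.1, t.2.2.1, t.2.2.2,
        PySem.Int.mod ((if four then t.1 else 0) + t.2.1 + t.2.2.1 + t.2.2.2) 1000000007))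
    (0, 0, 0, 1)
  st.2.2.2

def bProdStep (ans : Int) (r : Char × Nat) : Int :=
  PySem.Int.mod (ans * bRunCount (decide (r.1 = '7' ∨ r.1 = '9')) r.2) 1000000007

def countTexts_alt (pressedKeys : String) : Int :=
  (bRuns pressedKeys.toList).foldl bProdStep 1

-- ===== PRECONDITION & SPEC =====
-- Pre_ excludes exactly the empty string, on which A raises IndexError
def Pre_countTexts (pressedKeys : String) : Prop := pressedKeys ≠ ""
instance (pressedKeys : String) : Decidable (Pre_countTexts pressedKeys) := by unfold Pre_countTexts; infer_instance
def pvWitness_countTexts : String := "2277792"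

def Spec_countTexts (pressedKeys : String) (out : Int) : Prop := out = countTexts_alt pressedKeys
instance (pressedKeys : String) (out : Int) : Decidable (Spec_countTexts pressedKeys out) := by unfold Spec_countTexts; infer_instance

-- ===== CLAIM (what is proved, stated in full; the proofs are below) =====
def Claim_equal_countTexts : Prop := ∀ (pressedKeys : String), Dom_countTexts pressedKeys → Pre_countTexts pressedKeys → Spec_countTexts pressedKeys (countTexts pressedKeys)

-- ===== LEMMAS AND PROOFS =====

-- A's dp recurrence as a function of the index
def dpA (s : List Char) : Nat → Int
  | 0 => 1
  | (i + 1) =>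
    let ch := s.getD (i + 1) ' '
    let val := dpA s i
    let val :=
      if ch = s.getD i ' ' then
        let val := val + (if 2 ≤ i + 1 then dpA s (i - 1) else 1)
        let val :=
          if 2 ≤ i + 1 ∧ ch = s.getD (i - 1) ' ' then
            let val := val + (if 3 ≤ i + 1 then dpA s (i - 2) else 1)
            if 3 ≤ i + 1 ∧ ch = s.getD (i - 2) ' ' ∧ (ch = '7' ∨ ch = '9') then
              val + (if 4 ≤ i + 1 then dpA s (i - 3) else 1)
            else val
          else val
        val
      else val
    val % 1000000007

-- B's run recurrence: number of decodings of an isolated run of length k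
def fB (four : Bool) : Nat → Int
  | 0 => 1
  | (k + 1) =>
    ((if four = true ∧ 3 ≤ k then fB four (k - 3) else 0) +
     (if 2 ≤ k then fB four (k - 2) else 0) +
     (if 1 ≤ k then fB four (k - 1) else 0) + fB four k) % 1000000007

theorem dpA_prefix (t u : List Char) : ∀ i, i < t.length → dpA (t ++ u) i = dpA t i := by
  intro i
  induction i using Nat.strong_induction_on with
  | _ i ih =>
    intro hi
    match i with
    | 0 => rw [dpA, dpA]
    | (j + 1) =>
      rw [dpA, dpA]
      rw [List.getD_append _ _ _ (j + 1) hi, List.getD_append _ _ _ j (by omega),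
        List.getD_append _ _ _ (j - 1) (by omega), List.getD_append _ _ _ (j - 2) (by omega),
        ih j (by omega) (by omega), ih (j - 1) (by omega) (by omega),
        ih (j - 2) (by omega) (by omega), ih (j - 3) (by omega) (by omega)]

-- dp array contents after the first m loop iterations of A
def dpListG (s : List Char) (m : Nat) : List Int :=
  (List.range s.length).map (fun j => if j ≤ m then dpA s j else 0)

theorem dpListG_getD (s : List Char) (m j : Nat) (h1 : j ≤ m) (h2 : j < s.length) :
    (dpListG s m).getD j 0 = dpA s j := by
  unfold dpListG
  rw [List.getD_eq_getElem _ _ (by simpa using h2), List.getElem_map, List.getElem_range,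
    if_pos h1]

theorem dpListG_set (s : List Char) (m : Nat) (v : Int) (_h : m + 1 < s.length)
    (hv : v = dpA s (m + 1)) : (dpListG s m).set (m + 1) v = dpListG s (m + 1) := by
  unfold dpListG
  apply List.ext_getElem (by simp)
  intro j hj _
  rw [List.getElem_set, List.getElem_map, List.getElem_map]
  simp only [List.getElem_range]
  split_ifs <;> simp_all <;> omega

theorem dpListG_zero (s : List Char) :
    (List.replicate s.length (0 : Int)).set 0 1 = dpListG s 0 := by
  unfold dpListG
  apply List.ext_getElem (by simp)
  intro j hj _
  rw [List.getElem_set]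
  simp only [List.getElem_map, List.getElem_range, List.getElem_replicate]
  split_ifs with h1 h2 <;> first | (subst h1; rw [show dpA s 0 = 1 from by rw [dpA]]) | omega

theorem aStep_G (s : List Char) (m : Nat) (h : m + 1 < s.length) :
    aStep s (dpListG s m) (1 + (m : Int)) = dpListG s (m + 1) := by
  unfold aStep
  have hset : ∀ v : Int,
      PySem.List.pySetD (dpListG s m) (1 + (m : Int)) v = (dpListG s m).set (m + 1) v := by
    intro v
    rw [PySem.List.pySetD_of_nonneg _ _ (by omega)]
    congr 1
    omega
  rw [hset]
  rw [show (1 + (m : Int)) - 1 = ((m : Nat) : Int) from by ring,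
    PySem.List.pyGetD_natCast (dpListG s m) m 0, dpListG_getD s m m le_rfl (by omega),
    PySem.List.pyGetD_natCast s m ' ']
  rw [show (1 + (m : Int)) = (((m + 1 : Nat)) : Int) from by push_cast; ring,
    PySem.List.pyGetD_natCast s (m + 1) ' ']
  match m, h with
  | 0, h =>
    exact dpListG_set s 0 _ h (by
      rw [PySem.Int.mod_eq_emod_of_pos (by norm_num)]
      conv_rhs => rw [show (0:Nat) + 1 = 0 + 1 from rfl, dpA]
      norm_num)
  | 1, h =>
    exact dpListG_set s 1 _ h (by
      rw [PySem.Int.mod_eq_emod_of_pos (by norm_num)]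
      rw [show (((1 + 1 : Nat)) : Int) - 2 = ((0 : Nat) : Int) from by norm_num]
      rw [PySem.List.pyGetD_natCast (dpListG s 1) 0 0, dpListG_getD s 1 0 (by omega) (by omega),
        PySem.List.pyGetD_natCast s 0 ' ']
      conv_rhs => rw [dpA]
      norm_num)
  | 2, h =>
    exact dpListG_set s 2 _ h (by
      rw [PySem.Int.mod_eq_emod_of_pos (by norm_num)]
      rw [show (((2 + 1 : Nat)) : Int) - 2 = ((1 : Nat) : Int) from by norm_num,
        show (((2 + 1 : Nat)) : Int) - 3 = ((0 : Nat) : Int) from by norm_num]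
      rw [PySem.List.pyGetD_natCast (dpListG s 2) 1 0, dpListG_getD s 2 1 (by omega) (by omega),
        PySem.List.pyGetD_natCast (dpListG s 2) 0 0, dpListG_getD s 2 0 (by omega) (by omega),
        PySem.List.pyGetD_natCast s 1 ' ', PySem.List.pyGetD_natCast s 0 ' ']
      conv_rhs => rw [dpA]
      norm_num)
  | (m' + 3), h =>
    exact dpListG_set s (m' + 3) _ h (by
      rw [PySem.Int.mod_eq_emod_of_pos (by norm_num)]
      rw [show (((m' + 3 + 1 : Nat)) : Int) - 2 = ((m' + 2 : Nat) : Int) from by push_cast; ring,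
        show (((m' + 3 + 1 : Nat)) : Int) - 3 = ((m' + 1 : Nat) : Int) from by push_cast; ring,
        show (((m' + 3 + 1 : Nat)) : Int) - 4 = ((m' : Nat) : Int) from by push_cast; ring]
      rw [PySem.List.pyGetD_natCast (dpListG s (m' + 3)) (m' + 2) 0,
        dpListG_getD s (m' + 3) (m' + 2) (by omega) (by omega),
        PySem.List.pyGetD_natCast (dpListG s (m' + 3)) (m' + 1) 0,
        dpListG_getD s (m' + 3) (m' + 1) (by omega) (by omega),
        PySem.List.pyGetD_natCast (dpListG s (m' + 3)) m' 0,
        dpListG_getD s (m' + 3) m' (by omega) (by omega),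
        PySem.List.pyGetD_natCast s (m' + 2) ' ', PySem.List.pyGetD_natCast s (m' + 1) ' ']
      conv_rhs => rw [dpA]
      simp only [show ((2 : Int) ≤ ((m' + 3 + 1 : Nat) : Int)) = True from eq_true (by push_cast; omega),
        show ((3 : Int) ≤ ((m' + 3 + 1 : Nat) : Int)) = True from eq_true (by push_cast; omega),
        show ((4 : Int) ≤ ((m' + 3 + 1 : Nat) : Int)) = True from eq_true (by push_cast; omega),
        show (2 ≤ m' + 3 + 1) = True from eq_true (by omega),
        show (3 ≤ m' + 3 + 1) = True from eq_true (by omega),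
        show (4 ≤ m' + 3 + 1) = True from eq_true (by omega),
        true_and, if_true]
      rfl)

theorem countTexts_eq_dpA (pk : String) (h : pk.toList ≠ []) :
    countTexts pk = dpA pk.toList (pk.toList.length - 1) := by
  have hfold : ∀ m, m < pk.toList.length →
      (List.range m).foldl (fun dp (k : Nat) => aStep pk.toList dp (1 + (k : Int)))
        ((List.replicate pk.toList.length (0 : Int)).set 0 1) = dpListG pk.toList m := by
    intro m
    induction m with
    | zero => intro _; simpa using dpListG_zero pk.toList
    | succ j ih =>
      intro hm
      rw [List.range_succ, List.foldl_append, ih (by omega)]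
      simpa using aStep_G pk.toList j hm
  have hn : 1 ≤ pk.toList.length := by
    cases hc : pk.toList with
    | nil => exact absurd hc h
    | cons a l => simp
  unfold countTexts
  simp only [if_neg (show ¬ (pk.toList.length = 0) from by omega)]
  rw [PySem.List.pyRange_one, show ((pk.toList.length : Int) - 1).toNat = pk.toList.length - 1
    from by omega, List.foldl_map, hfold (pk.toList.length - 1) (by omega)]
  have hne : dpListG pk.toList (pk.toList.length - 1) ≠ [] := by
    unfold dpListG
    simp only [ne_eq, List.map_eq_nil_iff, List.range_eq_nil]
    omega
  rw [PySem.List.pyGetD_neg_one _ _ hne]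
  unfold dpListG
  rw [List.getLast_eq_getElem, List.getElem_map]
  simp only [List.length_map, List.length_range, List.getElem_range]
  rw [if_pos le_rfl]

theorem bRunCount_eq_fB (four : Bool) (L : Nat) : bRunCount four L = fB four L := by
  have key : ∀ M, (List.range M).foldl
      (fun (t : Int × Int × Int × Int) _ =>
        (t.2.1, t.2.2.1, t.2.2.2,
          PySem.Int.mod ((if four then t.1 else 0) + t.2.1 + t.2.2.1 + t.2.2.2) 1000000007))
      (0, 0, 0, 1) =
      ((if 3 ≤ M then fB four (M - 3) else 0), (if 2 ≤ M then fB four (M - 2) else 0),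
        (if 1 ≤ M then fB four (M - 1) else 0), fB four M) := by
    intro M
    induction M with
    | zero => simp [fB]
    | succ n ih =>
      rw [List.range_succ, List.foldl_append, ih]
      simp only [List.foldl_cons, List.foldl_nil,
        PySem.Int.mod_eq_emod_of_pos (by norm_num : (0:Int) < 1000000007)]
      refine Prod.ext ?_ (Prod.ext ?_ (Prod.ext ?_ ?_))
      · show (if 2 ≤ n then fB four (n - 2) else 0) = if 3 ≤ n + 1 then fB four (n + 1 - 3) else 0
        split_ifs <;> first | (congr 1; omega) | omega | rfl
      · show (if 1 ≤ n then fB four (n - 1) else 0) = if 2 ≤ n + 1 then fB four (n + 1 - 2) else 0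
        split_ifs <;> first | (congr 1; omega) | omega | rfl
      · show fB four n = if 1 ≤ n + 1 then fB four (n + 1 - 1) else 0
        rw [if_pos (by omega), Nat.add_sub_cancel]
      · simp only [fB]
        congr 1
        rcases four with _ | _ <;> split_ifs <;> simp_all
  unfold bRunCount
  rw [key]

def flatRuns (R : List (Char × Nat)) : List Char := R.flatMap (fun r => List.replicate r.2 r.1)

theorem bStep_good (R : List (Char × Nat)) (pre : List Char) (ch : Char)
    (h1 : flatRuns R = pre) (h2 : List.IsChain (fun a b : Char × Nat => a.1 ≠ b.1) R)
    (h3 : ∀ r ∈ R, 1 ≤ r.2) :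
    flatRuns (bStep R ch) = pre ++ [ch] ∧
      List.IsChain (fun a b : Char × Nat => a.1 ≠ b.1) (bStep R ch) ∧
      ∀ r ∈ bStep R ch, 1 ≤ r.2 := by
  unfold bStep
  cases hL : R.getLast? with
  | none =>
    have hR : R = [] := List.getLast?_eq_none_iff.mp hL
    subst hR
    simp only [flatRuns, List.flatMap_nil] at h1
    subst h1
    refine ⟨by simp [flatRuns], List.isChain_singleton _, by simp⟩
  | some cl =>
    obtain ⟨c, l⟩ := cl
    obtain ⟨ys, rfl⟩ := List.getLast?_eq_some_iff.mp hL
    rw [List.dropLast_concat]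
    simp only [flatRuns, List.flatMap_append, List.flatMap_cons, List.flatMap_nil,
      List.append_nil] at h1
    rw [List.isChain_append] at h2
    obtain ⟨hc1, _, hc3⟩ := h2
    dsimp only
    by_cases hch : c = ch
    · subst hch
      rw [if_pos rfl]
      refine ⟨?_, ?_, ?_⟩
      · simp only [flatRuns, List.flatMap_append, List.flatMap_cons, List.flatMap_nil,
          List.append_nil, List.replicate_succ' (n := l)]
        rw [← List.append_assoc, h1]
      · rw [List.isChain_append]
        exact ⟨hc1, List.isChain_singleton _, fun x hx y hy => by
          simp at hy; subst hy; exact hc3 x hx (c, l) rfl⟩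
      · intro r hr
        rcases List.mem_append.mp hr with h | h
        · exact h3 r (List.mem_append.mpr (Or.inl h))
        · simp at h; subst h; omega
    · rw [if_neg hch]
      refine ⟨?_, ?_, ?_⟩
      · simp only [flatRuns, List.flatMap_append, List.flatMap_cons, List.flatMap_nil,
          List.append_nil, List.replicate_one] at h1 ⊢
        subst h1
        simp
      · rw [List.isChain_append]
        refine ⟨List.isChain_append.mpr ⟨hc1, List.isChain_singleton _, hc3⟩,
          List.isChain_singleton _, fun x hx y hy => ?_⟩
        simp only [List.getLast?_concat, Option.mem_def, Option.some.injEq] at hx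
        simp at hy
        subst hx; subst hy
        exact hch
      · intro r hr
        rcases List.mem_append.mp hr with h | h
        · exact h3 r h
        · simp at h; subst h; omega

theorem bRuns_good (s : List Char) :
    flatRuns (bRuns s) = s ∧ List.IsChain (fun a b : Char × Nat => a.1 ≠ b.1) (bRuns s) ∧
      ∀ r ∈ bRuns s, 1 ≤ r.2 := by
  have key : ∀ (t : List Char) (R : List (Char × Nat)) (pre : List Char),
      flatRuns R = pre → List.IsChain (fun a b : Char × Nat => a.1 ≠ b.1) R →
      (∀ r ∈ R, 1 ≤ r.2) →
      flatRuns (t.foldl bStep R) = pre ++ t ∧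
        List.IsChain (fun a b : Char × Nat => a.1 ≠ b.1) (t.foldl bStep R) ∧
        ∀ r ∈ t.foldl bStep R, 1 ≤ r.2 := by
    intro t
    induction t with
    | nil => intro R pre h1 h2 h3; exact ⟨by simp [h1], h2, h3⟩
    | cons c t ih =>
      intro R pre h1 h2 h3
      obtain ⟨g1, g2, g3⟩ := bStep_good R pre c h1 h2 h3
      simpa using ih (bStep R c) (pre ++ [c]) g1 g2 g3
  exact key s [] [] rfl (by simp) (by simp)

theorem run_lemma (L : Nat) (c : Char) (u t : List Char) (P : Int)
    (hP0 : 0 ≤ P) (hP1 : P < 1000000007)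
    (hPe : t = [] → P = 1) (hPv : ∀ _ : t ≠ [], dpA t (t.length - 1) = P)
    (hlast : ∀ h : t ≠ [], t.getLast h ≠ c) :
    ∀ k, k < L →
      dpA (t ++ (List.replicate L c ++ u)) (t.length + k) =
        (P * fB (decide (c = '7' ∨ c = '9')) (k + 1)) % 1000000007 := by
  set s : List Char := t ++ (List.replicate L c ++ u) with hs
  set four : Bool := decide (c = '7' ∨ c = '9') with hfour
  set n0 : Nat := t.length with hn0
  have hchar : ∀ j, j < L → s.getD (n0 + j) ' ' = c := by
    intro j hj
    rw [hs, List.getD_append_right _ _ _ _ (by omega),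
      show n0 + j - t.length = j from by omega,
      List.getD_append _ _ _ j (by simpa using hj), List.getD_replicate _ hj]
  have hlastchar : ∀ h : t ≠ [], s.getD (n0 - 1) ' ' = t.getLast h := by
    intro h
    have hlen : 1 ≤ t.length := List.length_pos_of_ne_nil h
    rw [hs, List.getD_append _ _ _ _ (by omega), List.getD_eq_getElem _ _ (by omega),
      List.getLast_eq_getElem]
  have hP : P % 1000000007 = P := Int.emod_eq_of_lt hP0 hP1
  have hprev : ∀ _ : t ≠ [], dpA s (n0 - 1) = P := by
    intro h
    have hlen : 1 ≤ t.length := List.length_pos_of_ne_nil h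
    rw [hs, dpA_prefix t _ _ (by omega)]
    exact hPv h
  have hfB0 : fB four 0 = 1 := by rw [fB]
  have hmul : ∀ S : Int, (P * (S % 1000000007)) % 1000000007 = (P * S) % 1000000007 := by
    intro S
    rw [Int.mul_emod, Int.emod_emod_of_dvd _ dvd_rfl, ← Int.mul_emod]
  have hadd2 : ∀ x y : Int,
      (x % 1000000007 + y % 1000000007) % 1000000007 = (x + y) % 1000000007 := by
    intro x y; omega
  have hadd3 : ∀ x y z : Int,
      (x % 1000000007 + y % 1000000007 + z % 1000000007) % 1000000007 =
        (x + y + z) % 1000000007 := by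
    intro x y z; omega
  have hadd4 : ∀ x y z w : Int,
      (x % 1000000007 + y % 1000000007 + z % 1000000007 + w % 1000000007) % 1000000007 =
        (x + y + z + w) % 1000000007 := by
    intro x y z w; omega
  intro k
  induction k using Nat.strong_induction_on with
  | _ k ih =>
    intro hk
    have hterm : ∀ d, 1 ≤ d → d ≤ k + 1 →
        (if d ≤ n0 + k then dpA s (n0 + k - d) else 1) =
          (P * fB four (k + 1 - d)) % 1000000007 := by
      intro d hd1 hd2
      by_cases hc : d ≤ n0 + k
      · rw [if_pos hc]
        by_cases hkd : d ≤ k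
        · rw [show n0 + k - d = n0 + (k - d) from by omega, ih (k - d) (by omega) (by omega),
            show k - d + 1 = k + 1 - d from by omega]
        · have hn1 : 1 ≤ n0 := by omega
          have ht : t ≠ [] := by
            intro he
            rw [hn0, he] at hn1
            simp at hn1
          rw [show n0 + k - d = n0 - 1 from by omega, hprev ht,
            show k + 1 - d = 0 from by omega, hfB0, mul_one, hP]
      · rw [if_neg hc]
        have hn1 : n0 = 0 := by omega
        have ht : t = [] := by
          rw [hn0] at hn1
          exact List.length_eq_zero_iff.mp hn1
        rw [hPe ht, show k + 1 - d = 0 from by omega, hfB0, mul_one]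
        norm_num
    have hfB1 : fB four 1 = 1 := by
      rw [fB, hfB0]
      norm_num
    rcases Nat.eq_zero_or_pos (n0 + k) with hz | hpos
    · -- the very first key press: t = [] and k = 0
      have ht : t = [] := List.length_eq_zero_iff.mp (by omega)
      rw [hz, dpA, hPe ht, show k = 0 from by omega, hfB1]
      norm_num
    · obtain ⟨j, hj⟩ : ∃ j, n0 + k = j + 1 := ⟨n0 + k - 1, by omega⟩
      rw [hj, dpA]
      have hfBs : ∀ kk, fB four (kk + 1) =
          ((if four = true ∧ 3 ≤ kk then fB four (kk - 3) else 0) +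
            (if 2 ≤ kk then fB four (kk - 2) else 0) +
            (if 1 ≤ kk then fB four (kk - 1) else 0) + fB four kk) % 1000000007 := by
        intro kk
        rw [fB]
      match k, hk, hj with
      | 0, hk, hj =>
        -- first press of a later run: the previous character differs
        have ht : t ≠ [] := by
          intro he
          rw [hn0, he] at hj
          simp at hj
        have htop : s.getD (j + 1) ' ' = c := by
          rw [← hj]
          exact hchar 0 hk
        have hcond1 : (s.getD (j + 1) ' ' = s.getD j ' ') = False := by
          apply eq_false
          rw [htop, show j = n0 - 1 from by omega, hlastchar ht]
          exact fun he => hlast ht he.symm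
        simp only [hcond1, if_false]
        rw [show j = n0 - 1 from by omega, hprev ht, show (0 : Nat) + 1 = 1 from rfl, hfB1,
          mul_one]
      | 1, hk, hj =>
        have hj' : j = n0 := by omega
        subst hj'
        have htop : s.getD (n0 + 1) ' ' = c := hchar 1 hk
        have h0 : s.getD n0 ' ' = c := by
          have := hchar 0 (by omega)
          rwa [show n0 + 0 = n0 from rfl] at this
        have hval1 : dpA s n0 = (P * fB four 1) % 1000000007 := by
          have := ih 0 (by omega) (by omega)
          rwa [show n0 + 0 = n0 from rfl, show (0 : Nat) + 1 = 1 from rfl] at this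
        have ht2 : (if 2 ≤ n0 + 1 then dpA s (n0 - 1) else 1) =
            (P * fB four 0) % 1000000007 := by
          have h := hterm 2 (by omega) (by omega)
          rwa [show n0 + 1 - 2 = n0 - 1 from by omega, show 1 + 1 - 2 = 0 from rfl] at h
        have hc2 : (2 ≤ n0 + 1 ∧ c = s.getD (n0 - 1) ' ') = False := by
          apply eq_false
          rintro ⟨h1, h2⟩
          have hn1 : 1 ≤ n0 := by omega
          have ht : t ≠ [] := by
            intro he
            rw [hn0, he] at hn1
            simp at hn1
          rw [hlastchar ht] at h2
          exact hlast ht h2.symm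
        have hfB2 : fB four 2 = (fB four 0 + fB four 1) % 1000000007 := by
          rw [show (2 : Nat) = 1 + 1 from rfl, hfBs 1]
          norm_num
        simp only [htop, h0, hval1, ht2, hc2, if_true, if_false]
        rw [hadd2, show (1 : Nat) + 1 = 2 from rfl, hfB2, hmul]
        congr 1
        ring
      | 2, hk, hj =>
        have hj' : j = n0 + 1 := by omega
        subst hj'
        have htop : s.getD (n0 + 1 + 1) ' ' = c := by
          have := hchar 2 hk
          rwa [show n0 + 2 = n0 + 1 + 1 from by omega] at this
        have h1 : s.getD (n0 + 1) ' ' = c := hchar 1 (by omega)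
        have h0 : s.getD (n0 + 1 - 1) ' ' = c := by
          have := hchar 0 (by omega)
          rwa [show n0 + 0 = n0 + 1 - 1 from by omega] at this
        have hval1 : dpA s (n0 + 1) = (P * fB four 2) % 1000000007 := by
          have := ih 1 (by omega) (by omega)
          rwa [show (1 : Nat) + 1 = 2 from rfl] at this
        have hbare2 : dpA s (n0 + 1 - 1) = (P * fB four 1) % 1000000007 := by
          have := ih 0 (by omega) (by omega)
          rwa [show n0 + 0 = n0 + 1 - 1 from by omega, show (0 : Nat) + 1 = 1 from rfl] at this
        have ht3 : (if 3 ≤ n0 + 1 + 1 then dpA s (n0 + 1 - 2) else 1) =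
            (P * fB four 0) % 1000000007 := by
          have h := hterm 3 (by omega) (by omega)
          rwa [show n0 + 2 = n0 + 1 + 1 from by omega,
            show n0 + 1 + 1 - 3 = n0 + 1 - 2 from by omega, show 2 + 1 - 3 = 0 from rfl] at h
        have hc2 : (2 ≤ n0 + 1 + 1) = True := eq_true (by omega)
        have hc3 : (3 ≤ n0 + 1 + 1 ∧ c = s.getD (n0 + 1 - 2) ' ' ∧
            (c = '7' ∨ c = '9')) = False := by
          apply eq_false
          rintro ⟨ha, hb, -⟩
          have hn1 : 1 ≤ n0 := by omega
          have ht : t ≠ [] := by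
            intro he
            rw [hn0, he] at hn1
            simp at hn1
          rw [show n0 + 1 - 2 = n0 - 1 from by omega, hlastchar ht] at hb
          exact hlast ht hb.symm
        have hfB3 : fB four 3 = (fB four 0 + fB four 1 + fB four 2) % 1000000007 := by
          rw [show (3 : Nat) = 2 + 1 from rfl, hfBs 2]
          norm_num
        simp only [htop, h1, h0, hval1, hbare2, ht3, hc2, hc3, if_true,
          and_true, if_false]
        rw [hadd3, show (2 : Nat) + 1 = 3 from rfl, hfB3, hmul]
        congr 1
        ring
      | (k3 + 3), hk, hj =>
        have hj' : j = n0 + (k3 + 2) := by omega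
        subst hj'
        have htop : s.getD (n0 + (k3 + 2) + 1) ' ' = c := by
          have := hchar (k3 + 3) hk
          rwa [show n0 + (k3 + 3) = n0 + (k3 + 2) + 1 from by omega] at this
        have h2 : s.getD (n0 + (k3 + 2)) ' ' = c := hchar (k3 + 2) (by omega)
        have h1 : s.getD (n0 + (k3 + 2) - 1) ' ' = c := by
          have := hchar (k3 + 1) (by omega)
          rwa [show n0 + (k3 + 1) = n0 + (k3 + 2) - 1 from by omega] at this
        have h0 : s.getD (n0 + (k3 + 2) - 2) ' ' = c := by
          have := hchar k3 (by omega)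
          rwa [show n0 + k3 = n0 + (k3 + 2) - 2 from by omega] at this
        have hval1 : dpA s (n0 + (k3 + 2)) = (P * fB four (k3 + 3)) % 1000000007 := by
          have := ih (k3 + 2) (by omega) (by omega)
          rwa [show k3 + 2 + 1 = k3 + 3 from rfl] at this
        have hbare2 : dpA s (n0 + (k3 + 2) - 1) = (P * fB four (k3 + 2)) % 1000000007 := by
          have := ih (k3 + 1) (by omega) (by omega)
          rwa [show n0 + (k3 + 1) = n0 + (k3 + 2) - 1 from by omega,
            show k3 + 1 + 1 = k3 + 2 from rfl] at this
        have hbare3 : dpA s (n0 + (k3 + 2) - 2) = (P * fB four (k3 + 1)) % 1000000007 := by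
          have := ih k3 (by omega) (by omega)
          rwa [show n0 + k3 = n0 + (k3 + 2) - 2 from by omega] at this
        have ht4 : (if 4 ≤ n0 + (k3 + 2) + 1 then dpA s (n0 + (k3 + 2) - 3) else 1) =
            (P * fB four k3) % 1000000007 := by
          have h := hterm 4 (by omega) (by omega)
          rwa [show n0 + (k3 + 3) = n0 + (k3 + 2) + 1 from by omega,
            show n0 + (k3 + 2) + 1 - 4 = n0 + (k3 + 2) - 3 from by omega,
            show k3 + 3 + 1 - 4 = k3 from by omega] at h
        have hc2 : (2 ≤ n0 + (k3 + 2) + 1) = True := eq_true (by omega)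
        have hc3n : (3 ≤ n0 + (k3 + 2) + 1) = True := eq_true (by omega)
        by_cases h79 : c = '7' ∨ c = '9'
        · have hft : four = true := by
            rw [hfour]
            exact decide_eq_true h79
          have hc79 : (c = '7' ∨ c = '9') = True := eq_true h79
          have hfBtop : fB four (k3 + 3 + 1) =
              (fB four k3 + fB four (k3 + 1) + fB four (k3 + 2) + fB four (k3 + 3)) %
                1000000007 := by
            rw [hfBs (k3 + 3), if_pos (⟨hft, by omega⟩ : four = true ∧ 3 ≤ k3 + 3),
              if_pos (by omega : 2 ≤ k3 + 3), if_pos (by omega : 1 ≤ k3 + 3),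
              show k3 + 3 - 3 = k3 from by omega, show k3 + 3 - 2 = k3 + 1 from by omega,
              show k3 + 3 - 1 = k3 + 2 from by omega]
          simp only [htop, h2, h1, h0, hval1, hbare2, hbare3, ht4, hc2, hc3n, hc79,
            if_true, and_true]
          rw [hadd4, hfBtop, hmul]
          congr 1
          ring
        · have hff : four = false := by
            rw [hfour]
            exact decide_eq_false h79
          have hc79 : (c = '7' ∨ c = '9') = False := eq_false h79
          have hfBtop : fB four (k3 + 3 + 1) =
              (0 + fB four (k3 + 1) + fB four (k3 + 2) + fB four (k3 + 3)) % 1000000007 := by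
            rw [hfBs (k3 + 3), if_neg (by simp [hff] : ¬(four = true ∧ 3 ≤ k3 + 3)),
              if_pos (by omega : 2 ≤ k3 + 3),
              if_pos (by omega : 1 ≤ k3 + 3), show k3 + 3 - 2 = k3 + 1 from by omega,
              show k3 + 3 - 1 = k3 + 2 from by omega]
          simp only [htop, h2, h1, h0, hval1, hbare2, hbare3, hc2, hc3n, hc79,
            if_true, and_true, and_false, if_false]
          rw [hadd3, hfBtop, hmul]
          congr 1
          ring


theorem outer_lemma (R : List (Char × Nat)) : ∀ (t : List Char) (P : Int),
    List.IsChain (fun a b : Char × Nat => a.1 ≠ b.1) R → (∀ r ∈ R, 1 ≤ r.2) →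
    0 ≤ P → P < 1000000007 →
    (t = [] → P = 1) → (∀ _ : t ≠ [], dpA t (t.length - 1) = P) →
    (∀ cl ∈ R.head?, ∀ h : t ≠ [], t.getLast h ≠ cl.1) →
    R.foldl bProdStep P =
      if t ++ flatRuns R = [] then P else dpA (t ++ flatRuns R) ((t ++ flatRuns R).length - 1) := by
  induction R with
  | nil =>
    intro t P _ _ _ _ _ hPv _
    simp only [List.foldl_nil, flatRuns, List.flatMap_nil, List.append_nil]
    split_ifs with ht
    · rfl
    · exact (hPv ht).symm
  | cons r R' ih =>
    obtain ⟨c, L⟩ := r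
    intro t P hch hlen hP0 hP1 hPe hPv hhead
    have hL : 1 ≤ L := hlen (c, L) (by simp)
    have hrepl : List.replicate L c ≠ [] := by simp; omega
    have hstep : bProdStep P (c, L) = (P * fB (decide (c = '7' ∨ c = '9')) L) % 1000000007 := by
      unfold bProdStep
      rw [PySem.Int.mod_eq_emod_of_pos (by norm_num), bRunCount_eq_fB]
    have hrun := run_lemma L c [] t P hP0 hP1 hPe hPv
      (fun ht => hhead (c, L) rfl ht) (L - 1) (by omega)
    rw [List.append_nil, show L - 1 + 1 = L from by omega] at hrun
    have ht' : t ++ List.replicate L c ≠ [] := by simp [hrepl]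
    have hnext := ih (t ++ List.replicate L c) ((P * fB (decide (c = '7' ∨ c = '9')) L) % 1000000007)
      ((List.isChain_cons.mp hch).2) (fun r hr => hlen r (List.mem_cons_of_mem _ hr))
      (Int.emod_nonneg _ (by norm_num)) (Int.emod_lt_of_pos _ (by norm_num))
      (fun he => absurd he ht')
      (fun _ => by
        rw [List.length_append, List.length_replicate,
          show t.length + L - 1 = t.length + (L - 1) from by omega]
        exact hrun)
      (fun cl hcl ht2 => by
        rw [List.getLast_append_of_ne_nil ht2 hrepl, List.getLast_replicate]
        intro he
        exact ((List.isChain_cons.mp hch).1 cl hcl) (by rw [← he]))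
    rw [List.foldl_cons, hstep, hnext]
    have hflat : (t ++ List.replicate L c) ++ flatRuns R' = t ++ flatRuns ((c, L) :: R') := by
      simp [flatRuns, List.flatMap_cons, List.append_assoc]
    rw [hflat]
    have hne2 : t ++ flatRuns ((c, L) :: R') ≠ [] := by
      intro he
      have := congrArg List.length he
      simp [flatRuns, List.flatMap_cons] at this
      omega
    rw [if_neg hne2, if_neg hne2]

-- ===== VERDICT (by name: the statement is the Claim_ definition above) =====
theorem countTexts_spec : Claim_equal_countTexts := by
  intro pk _ hpre
  unfold Spec_countTexts
  have hs : pk.toList ≠ [] := by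
    intro h
    exact hpre (String.toList_eq_nil_iff.mp h)
  obtain ⟨hflat, hchain, hlen⟩ := bRuns_good pk.toList
  have := outer_lemma (bRuns pk.toList) [] 1 hchain hlen (by norm_num) (by norm_num)
    (fun _ => rfl) (fun h => absurd rfl h) (by intro cl _ h; exact absurd rfl h)
  rw [countTexts_eq_dpA pk hs]
  unfold countTexts_alt
  rw [this]
  simp only [List.nil_append, hflat]
  simp [hs]
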